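-- pv_equiv track=rewrite | github.com/Thoru17A/Lab2 | Task2Pyhton.py | find_final
-- ===== SOURCE A (Python) =====
-- def find_final(pairs):
--     start_count = {}
--     end_count = {}
--
--     # Заполняем словари начальных и конечных пунктов
--     for pair in pairs:
--         start_count[pair[0]] = start_count.get(pair[0], 0) + 1
--         end_count[pair[1]] = end_count.get(pair[1], 0) + 1
--
--     # Ищем пункт, который не является начальным для какой-либо пары
--     for end in end_count:
--         if end not in start_count:
--             return end
--
--     # Если все пункты являются начальными для какой-либо пары, возвращаем сообщение о необходимости обращения к специалисту
--     return "обратитесь к специалисту"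
-- ===== SOURCE B (Python) =====
-- def find_final(pairs):
--     for _, end in pairs:
--         if all(start != end for start, _ in pairs):
--             return end
--     return "обратитесь к специалисту"
-- ===== Notes on version B (the rewrite author's own statement) =====
-- stated objective: alternative
-- what changed: Replaces A's two hash-count dicts plus a scan over the dict of unique ends by an index-free brute-force nested scan: for each pair's end, an inner pass over all pairs checks that no start equals it; no dict or set is built at all (trades O(n) hashed for O(n^2) comparison-only).
import Mathlib
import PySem

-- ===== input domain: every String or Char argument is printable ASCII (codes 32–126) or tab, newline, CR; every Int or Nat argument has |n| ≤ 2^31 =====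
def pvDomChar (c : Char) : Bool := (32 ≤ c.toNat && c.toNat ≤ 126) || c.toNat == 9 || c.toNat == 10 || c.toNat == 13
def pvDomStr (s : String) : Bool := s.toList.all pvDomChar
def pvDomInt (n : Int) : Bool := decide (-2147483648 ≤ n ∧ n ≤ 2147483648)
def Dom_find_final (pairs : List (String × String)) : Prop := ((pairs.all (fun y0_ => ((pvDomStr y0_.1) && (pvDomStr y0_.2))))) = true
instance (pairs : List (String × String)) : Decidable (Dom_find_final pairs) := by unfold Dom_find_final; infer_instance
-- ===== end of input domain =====

-- B drops both counting dicts: an index-free brute-force nested scan checks each pair's end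
-- against every start by an inner pass (objective: alternative — no hash structure at all).

-- ===== PORT A =====
-- A's first loop, filling both count dicts over the pairs.
def pvCountsA (pairs : List (String × String)) : PySem.Dict String Int × PySem.Dict String Int :=
  pairs.foldl
    (fun st pair =>
      (st.1.insert pair.1 (st.1.getD pair.1 0 + 1),
       st.2.insert pair.2 (st.2.getD pair.2 0 + 1)))
    (PySem.Dict.empty, PySem.Dict.empty)

def find_final (pairs : List (String × String)) : String :=
  let counts := pvCountsA pairs
  match counts.2.keys.find? (fun e => !counts.1.contains e) with
  | some e => e
  | none => "обратитесь к специалисту"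

-- ===== PORT B =====
def find_final_alt (pairs : List (String × String)) : String :=
  match pairs.find? (fun p => pairs.all (fun q => q.1 != p.2)) with
  | some p => p.2
  | none => "обратитесь к специалисту"

-- ===== PRECONDITION & SPEC =====
def Spec_find_final (pairs : List (String × String)) (out : String) : Prop := out = find_final_alt pairs
instance (pairs : List (String × String)) (out : String) : Decidable (Spec_find_final pairs out) := by unfold Spec_find_final; infer_instance

-- ===== CLAIM (what is proved, stated in full; the proofs are below) =====
def Claim_equal_find_final : Prop := ∀ (pairs : List (String × String)), Dom_find_final pairs → Spec_find_final pairs (find_final pairs)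

-- ===== LEMMAS AND PROOFS =====

-- A's counting insert-fold: key membership of the resulting dict = membership in the folded list.
lemma contains_insFold (l : List String) (d : PySem.Dict String Int) (y : String) :
    (l.foldl (fun d x => d.insert x (d.getD x 0 + 1)) d).contains y = (d.contains y || l.contains y) := by
  induction l generalizing d with
  | nil => simp
  | cons x t ih =>
    simp only [List.foldl_cons, ih, PySem.Dict.contains_insert, List.contains_cons]
    cases d.contains y <;> cases (y == x) <;> simp

-- A's counting insert-fold builds its keys exactly like set.add.
lemma keys_insFold (l : List String) (d : PySem.Dict String Int) :
    (l.foldl (fun d x => d.insert x (d.getD x 0 + 1)) d).keys = l.foldl PySem.Set.add d.keys := by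
  induction l generalizing d with
  | nil => rfl
  | cons x t ih =>
    simp only [List.foldl_cons]
    rw [ih]
    congr 1
    by_cases h : d.contains x = true
    · rw [PySem.Dict.keys_insert_of_contains d _ h]
      have hm : x ∈ d.keys := (PySem.Dict.contains_iff_mem_keys d x).mp h
      simp [PySem.Set.add, hm]
    · rw [PySem.Dict.keys_insert_of_not_contains d _ (by simpa using h)]
      have hm : x ∉ d.keys := fun hx => h ((PySem.Dict.contains_iff_mem_keys d x).mpr hx)
      simp [PySem.Set.add, hm]

-- A's pair-fold fills the two dicts independently: it splits into a fold over the starts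
-- and a fold over the ends.
lemma pvCountsA_aux (pairs : List (String × String)) :
    ∀ st : PySem.Dict String Int × PySem.Dict String Int,
      pairs.foldl
        (fun st pair =>
          (st.1.insert pair.1 (st.1.getD pair.1 0 + 1),
           st.2.insert pair.2 (st.2.getD pair.2 0 + 1))) st
        = ((pairs.map Prod.fst).foldl (fun d x => d.insert x (d.getD x 0 + 1)) st.1,
           (pairs.map Prod.snd).foldl (fun d x => d.insert x (d.getD x 0 + 1)) st.2) := by
  induction pairs with
  | nil => intro st; rfl
  | cons p t ih =>
    intro st
    simp only [List.foldl_cons, List.map_cons]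
    rw [ih]

lemma pvCountsA_eq (pairs : List (String × String)) :
    pvCountsA pairs =
      ((pairs.map Prod.fst).foldl (fun d x => d.insert x (d.getD x 0 + 1)) PySem.Dict.empty,
       (pairs.map Prod.snd).foldl (fun d x => d.insert x (d.getD x 0 + 1)) PySem.Dict.empty) := by
  unfold pvCountsA
  rw [pvCountsA_aux]

-- find? only sees the filter predicate on elements satisfying q.
lemma find?_filter_congr {α : Type} (q : α → Bool) (p₁ p₂ : α → Bool) (t : List α)
    (h : ∀ y ∈ t, q y = true → p₁ y = p₂ y) :
    (t.filter p₁).find? q = (t.filter p₂).find? q := by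
  induction t with
  | nil => rfl
  | cons y t ih =>
    have ht : ∀ z ∈ t, q z = true → p₁ z = p₂ z := fun z hz => h z (List.mem_cons_of_mem _ hz)
    by_cases hq : q y = true
    · have hpy := h y (List.mem_cons_self) hq
      cases hp : p₂ y <;>
        simp [hpy, hp, hq, ih ht]
    · cases hp1 : p₁ y <;> cases hp2 : p₂ y <;>
        simp [hp1, hp2, hq, ih ht]

-- set.add-folding only ever appends to the accumulator.
lemma foldl_add_append {α : Type} [BEq α] (t : List α) (s : List α) :
    ∃ r, List.foldl PySem.Set.add s t = s ++ r := by
  induction t generalizing s with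
  | nil => exact ⟨[], by simp⟩
  | cons x t ih =>
    simp only [List.foldl_cons]
    by_cases h : PySem.Set.contains s x = true
    · rw [show PySem.Set.add s x = s from by unfold PySem.Set.add; rw [if_pos h]]
      exact ih s
    · rw [show PySem.Set.add s x = s ++ [x] from by unfold PySem.Set.add; rw [if_neg h]]
      obtain ⟨r, hr⟩ := ih (s ++ [x])
      exact ⟨x :: r, by rw [hr, List.append_assoc, List.singleton_append]⟩

-- first q-hit of the set fold = first q-hit of the elements not already seen.
lemma find?_foldl_add {α : Type} [BEq α] [LawfulBEq α] (q : α → Bool) (l : List α) :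
    ∀ s : List α, (∀ y ∈ s, q y = false) →
    (List.foldl PySem.Set.add s l).find? q = (l.filter (fun x => !decide (x ∈ s))).find? q := by
  induction l with
  | nil =>
    intro s hs
    have hn : List.find? q s = none := List.find?_eq_none.mpr (fun y hy => by simp [hs y hy])
    simpa using hn
  | cons x t ih =>
    intro s hs
    have hadd : PySem.Set.add s x = if s.contains x = true then s else s ++ [x] := rfl
    simp only [List.foldl_cons, List.filter_cons, hadd]
    by_cases hx : x ∈ s
    · rw [if_pos (by simpa using hx), ih s hs, if_neg (by simp [hx])]
    · by_cases hqx : q x = true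
      · obtain ⟨r, hr⟩ := foldl_add_append t (s ++ [x])
        rw [if_neg (by simpa using hx), hr, List.append_assoc, List.find?_append]
        have hsn : List.find? q s = none := List.find?_eq_none.mpr (fun y hy => by simp [hs y hy])
        rw [if_pos (by simp [hx])]
        simp [hsn, hqx]
      · have hs' : ∀ y ∈ s ++ [x], q y = false := by
          intro y hy
          rcases List.mem_append.mp hy with h | h
          · exact hs y h
          · simp only [List.mem_singleton] at h; subst h; simpa using hqx
        rw [if_neg (by simpa using hx), ih (s ++ [x]) hs', if_pos (by simp [hx])]
        rw [List.find?_cons_of_neg (by simpa using hqx)]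
        apply find?_filter_congr
        intro y _ hqy
        have hyx : y ≠ x := fun h => by subst h; exact hqx hqy
        simp [List.mem_append, hyx]

-- first q-hit of set(l) (first-occurrence dedup) = first q-hit of l itself.
lemma find?_ofList {α : Type} [BEq α] [LawfulBEq α] (q : α → Bool) (l : List α) :
    (PySem.Set.ofList l).find? q = l.find? q := by
  have h := find?_foldl_add q l [] (by simp)
  simpa [PySem.Set.ofList, PySem.Set.empty] using h

-- ===== VERDICT (by name: the statement is the Claim_ definition above) =====
theorem find_final_spec : Claim_equal_find_final := by
  intro pairs _hdom
  unfold Spec_find_final find_final find_final_alt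
  show (match ((pvCountsA pairs).2.keys).find? (fun e => !(pvCountsA pairs).1.contains e) with
        | some e => e
        | none => "обратитесь к специалисту") =
       (match pairs.find? (fun p => pairs.all (fun q => q.1 != p.2)) with
        | some p => p.2
        | none => "обратитесь к специалисту")
  rw [pvCountsA_eq]
  dsimp only
  rw [keys_insFold, PySem.Dict.keys_empty]
  have hkeys : List.foldl PySem.Set.add [] (pairs.map Prod.snd)
      = PySem.Set.ofList (pairs.map Prod.snd) := rfl
  rw [hkeys]
  have hpred : (fun e => !((pairs.map Prod.fst).foldl
        (fun (d : PySem.Dict String Int) x => d.insert x (d.getD x 0 + 1)) PySem.Dict.empty).contains e)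
      = (fun e => pairs.all (fun q => q.1 != e)) := by
    funext e
    rw [contains_insFold]
    by_cases hm : e ∈ pairs.map Prod.fst
    · obtain ⟨q, hq, hqe⟩ := List.mem_map.mp hm
      have hall : pairs.all (fun q => !(q.1 == e)) = false :=
        List.all_eq_false.mpr ⟨q, hq, by simp [hqe]⟩
      simp [hm, bne, hall]
    · have hall : pairs.all (fun q => !(q.1 == e)) = true :=
        List.all_eq_true.mpr (fun q hq => by
          simp only [Bool.not_eq_eq_eq_not, Bool.not_true, beq_eq_false_iff_ne, ne_eq]
          intro h; exact hm (List.mem_map.mpr ⟨q, hq, h⟩))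
      simp [hm, bne, hall]
  rw [hpred, find?_ofList, List.find?_map]
  have hcomp : ((fun e => pairs.all (fun q => q.1 != e)) ∘ Prod.snd)
      = (fun p : String × String => pairs.all (fun q => q.1 != p.2)) := rfl
  rw [hcomp]
  cases h : pairs.find? (fun p : String × String => pairs.all (fun q => q.1 != p.2)) <;>
    rfl
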